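-- pv_equiv track=rewrite | github.com/BzhangURU/LeetCode-Python-Solutions | LC00468_Validate_IP_Address.py | is_valid_v6_part
-- ===== SOURCE A (Python) =====
-- def is_valid_v6_part(a_part):
--     if len(a_part)==0 or len(a_part)>4:
--         return False
--     for i in range(len(a_part)):
--         if (ord(a_part[i])<=ord('9') and ord(a_part[i])>=ord('0')) or \
--             (ord(a_part[i])<=ord('f') and ord(a_part[i])>=ord('a')) or \
--             (ord(a_part[i])<=ord('F') and ord(a_part[i])>=ord('A')):
--             pass
--         else:
--             return False
--     return True
-- ===== SOURCE B (Python) =====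
-- import re
--
-- def is_valid_v6_part(a_part):
--     return bool(re.fullmatch(r'[0-9a-fA-F]{1,4}', a_part))
-- ===== Notes on version B (the rewrite author's own statement) =====
-- stated objective: idiomatic
-- what changed: Replaces the explicit length guard and per-character ord-range loop with a single anchored regular-expression fullmatch of [0-9a-fA-F]{1,4}.
import Mathlib
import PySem

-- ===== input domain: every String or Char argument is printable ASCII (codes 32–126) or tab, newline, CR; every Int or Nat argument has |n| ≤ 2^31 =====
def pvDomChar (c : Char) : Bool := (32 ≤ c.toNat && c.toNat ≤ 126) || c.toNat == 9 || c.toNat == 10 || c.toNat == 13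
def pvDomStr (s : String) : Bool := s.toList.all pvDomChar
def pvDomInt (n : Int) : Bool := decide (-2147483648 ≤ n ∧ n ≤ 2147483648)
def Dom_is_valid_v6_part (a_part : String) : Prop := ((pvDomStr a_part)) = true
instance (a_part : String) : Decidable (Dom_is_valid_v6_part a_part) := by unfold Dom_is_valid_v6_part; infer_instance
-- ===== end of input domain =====

-- B replaces A's explicit length guard and per-character ord-range loop by one anchored
-- regex fullmatch of [0-9a-fA-F]{1,4} (idiomatic); same return value everywhere.

-- ===== PORT A =====
-- the for-loop over range(len(a_part)) with its early 'return False'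
def pvLoopA : List Char → Bool
  | [] => true
  | c :: rest =>
      if (c.toNat ≤ '9'.toNat ∧ '0'.toNat ≤ c.toNat) ∨
         (c.toNat ≤ 'f'.toNat ∧ 'a'.toNat ≤ c.toNat) ∨
         (c.toNat ≤ 'F'.toNat ∧ 'A'.toNat ≤ c.toNat) then
        pvLoopA rest
      else
        false

def is_valid_v6_part (a_part : String) : Bool :=
  if a_part.toList.length = 0 ∨ a_part.toList.length > 4 then false
  else pvLoopA a_part.toList

-- ===== PORT B =====
-- the regex r'[0-9a-fA-F]{1,4}': character-class membership …
def pvHexClass (c : Char) : Bool :=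
  ('0' ≤ c && c ≤ '9') || ('a' ≤ c && c ≤ 'f') || ('A' ≤ c && c ≤ 'F')

-- … under full-string anchoring with the {1,4} repetition bound
def is_valid_v6_part_alt (a_part : String) : Bool :=
  decide (1 ≤ a_part.toList.length ∧ a_part.toList.length ≤ 4) &&
    a_part.toList.all pvHexClass

-- ===== PRECONDITION & SPEC =====
def Spec_is_valid_v6_part (a_part : String) (out : Bool) : Prop := out = is_valid_v6_part_alt a_part
instance (a_part : String) (out : Bool) : Decidable (Spec_is_valid_v6_part a_part out) := by unfold Spec_is_valid_v6_part; infer_instance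

-- ===== CLAIM (what is proved, stated in full; the proofs are below) =====
def Claim_equal_is_valid_v6_part : Prop := ∀ (a_part : String), Dom_is_valid_v6_part a_part → Spec_is_valid_v6_part a_part (is_valid_v6_part a_part)

-- ===== LEMMAS AND PROOFS =====
theorem pvHex_iff (c : Char) :
    pvHexClass c = true ↔
      ((c.toNat ≤ '9'.toNat ∧ '0'.toNat ≤ c.toNat) ∨
       (c.toNat ≤ 'f'.toNat ∧ 'a'.toNat ≤ c.toNat) ∨
       (c.toNat ≤ 'F'.toNat ∧ 'A'.toNat ≤ c.toNat)) := by
  simp only [pvHexClass, Bool.or_eq_true, Bool.and_eq_true, decide_eq_true_eq,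
    Char.le_def, UInt32.le_iff_toNat_le, Char.toNat]
  omega

theorem pvLoopA_eq_all (cs : List Char) : pvLoopA cs = cs.all pvHexClass := by
  induction cs with
  | nil => rfl
  | cons c rest ih =>
      simp only [pvLoopA, List.all_cons]
      split_ifs with h
      · rw [ih, (pvHex_iff c).mpr h, Bool.true_and]
      · rw [Bool.eq_false_iff.mpr (fun hc => h ((pvHex_iff c).mp hc)), Bool.false_and]

-- ===== VERDICT (by name: the statement is the Claim_ definition above) =====
theorem is_valid_v6_part_spec : Claim_equal_is_valid_v6_part := by
  intro a_part _
  unfold Spec_is_valid_v6_part is_valid_v6_part is_valid_v6_part_alt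
  rw [pvLoopA_eq_all]
  split_ifs with h
  · rw [decide_eq_false (by omega : ¬ (1 ≤ a_part.toList.length ∧ a_part.toList.length ≤ 4))]
    rfl
  · rw [decide_eq_true (by omega : 1 ≤ a_part.toList.length ∧ a_part.toList.length ≤ 4)]
    rw [Bool.true_and]
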